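-- pv_equiv track=rewrite | github.com/SmellyArmure/OC_DS_Project6 | NOTEBOOK/P6_GENERAL_functions.py | combinlist
-- ===== SOURCE A (Python) =====
-- def combinlist(seq, k):
--     p = []
--     i, imax = 0, 2**len(seq)-1
--     while i<=imax:
--         s = []
--         j, jmax = 0, len(seq)-1
--         while j<=jmax:
--             if (i>>j)&1==1:
--                 s.append(seq[j])
--             j += 1
--         if len(s)==k:
--             p.append(tuple(s))
--         i += 1
--     return p
-- ===== SOURCE B (Python) =====
-- def combinlist(seq, k):
--     # Generate only the C(n,k) index-combinations, directly in increasing-bitmask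
--     # (colexicographic) order, instead of scanning all 2**n masks.
--     n = len(seq)
--
--     def colex(n, k):
--         # k-subsets of range(n) in colex order (= increasing sum of 2**j)
--         if k == 0:
--             return [()]
--         if k < 0:
--             return []
--         res = []
--         for m in range(n):
--             for c in colex(m, k - 1):
--                 res.append(c + (m,))
--         return res
--
--     return [tuple(seq[j] for j in c) for c in colex(n, k)]
-- ===== Notes on version B (the rewrite author's own statement) =====
-- stated objective: alternative
-- what changed: Instead of scanning all 2**n bitmasks and filtering by popcount, B recursively generates only the C(n,k) index-combinations directly in colexicographic (= increasing bitmask) order and maps them through seq.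
import Mathlib
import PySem

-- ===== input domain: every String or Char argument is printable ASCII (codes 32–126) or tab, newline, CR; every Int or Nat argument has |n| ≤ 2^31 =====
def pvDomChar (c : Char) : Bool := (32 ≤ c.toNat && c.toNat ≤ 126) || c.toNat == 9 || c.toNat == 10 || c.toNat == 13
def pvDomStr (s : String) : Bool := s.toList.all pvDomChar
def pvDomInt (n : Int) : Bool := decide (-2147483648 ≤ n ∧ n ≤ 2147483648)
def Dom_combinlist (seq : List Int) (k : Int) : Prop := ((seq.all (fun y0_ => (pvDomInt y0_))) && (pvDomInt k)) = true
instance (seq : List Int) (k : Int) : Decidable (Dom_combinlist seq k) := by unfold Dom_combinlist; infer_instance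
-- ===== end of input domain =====

-- B replaces A's scan of all 2^n bitmasks by direct recursive generation of the C(n,k)
-- index-combinations in colexicographic (= increasing-bitmask) order (alternative algorithm).


-- ===== PORT A =====
-- A's loop counters i, j (and bounds) are nonnegative Python ints throughout; they are ported
-- as Nat: '(i>>j)&1==1' is Nat.testBit i j, 'j <= len(seq)-1' is 'j < seq.length' and
-- 'i <= 2**len(seq)-1' is 'i < 2^seq.length' (exact also for the empty list, where
-- Python's jmax = -1 never admits j = 0).  seq[j] has 0 ≤ j < len(seq) here, so getD is exact.
def aInner (seq : List Int) (i : Nat) (j : Nat) (s : List Int) : List Int :=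
  if j < seq.length then
    aInner seq i (j + 1) (if i.testBit j then s ++ [seq.getD j 0] else s)
  else s
termination_by seq.length - j

def aOuter (seq : List Int) (k : Int) (i : Nat) (p : List (List Int)) : List (List Int) :=
  if i < 2 ^ seq.length then
    let s := aInner seq i 0 []
    aOuter seq k (i + 1) (if (s.length : Int) = k then p ++ [s] else p)
  else p
termination_by 2 ^ seq.length - i

def combinlist (seq : List Int) (k : Int) : List (List Int) := aOuter seq k 0 []

-- ===== PORT B =====
-- colex n k: the k-element subsets of range n in colexicographic order (Source B's colex);
-- the nested append loops 'for m in range(n): for c in colex(m,k-1): res.append(c+(m,))'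
-- are the flatMap/map below.
def colexB (n : Nat) (k : Int) : List (List Nat) :=
  if k = 0 then [[]]
  else if k < 0 then []
  else (List.range n).attach.flatMap (fun m => (colexB m.1 (k - 1)).map (fun c => c ++ [m.1]))
termination_by n
decreasing_by exact List.mem_range.mp m.2

def combinlist_alt (seq : List Int) (k : Int) : List (List Int) :=
  (colexB seq.length k).map (fun c => c.map (fun j => seq.getD j 0))

-- ===== PRECONDITION & SPEC =====
def Spec_combinlist (seq : List Int) (k : Int) (out : List (List Int)) : Prop := out = combinlist_alt seq k
instance (seq : List Int) (k : Int) (out : List (List Int)) : Decidable (Spec_combinlist seq k out) := by unfold Spec_combinlist; infer_instance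

-- ===== CLAIM (what is proved, stated in full; the proofs are below) =====
def Claim_equal_combinlist : Prop := ∀ (seq : List Int) (k : Int), Dom_combinlist seq k → Spec_combinlist seq k (combinlist seq k)

-- ===== LEMMAS AND PROOFS =====

/-- The indices of the set bits of `i` below `n`, in increasing order. -/
def bitsOf (n i : Nat) : List Nat := (List.range n).filter i.testBit

theorem aInner_spec (seq : List Int) (i j : Nat) (s : List Int) :
    aInner seq i j s =
      s ++ ((List.range' j (seq.length - j)).filter i.testBit).map (fun t => seq.getD t 0) := by
  by_cases h : j < seq.length
  · have hlen : seq.length - j = (seq.length - (j+1)) + 1 := by omega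
    rw [aInner, if_pos h, aInner_spec, hlen, List.range'_succ]
    by_cases hb : i.testBit j <;> simp [hb]
  · rw [aInner, if_neg h]
    have : seq.length - j = 0 := by omega
    simp [this]
termination_by seq.length - j

theorem aOuter_spec (seq : List Int) (k : Int) (i : Nat) (p : List (List Int)) :
    aOuter seq k i p =
      p ++ (List.range' i (2 ^ seq.length - i)).filterMap (fun t =>
        let s := aInner seq t 0 []
        if (s.length : Int) = k then some s else none) := by
  by_cases h : i < 2 ^ seq.length
  · have hlen : 2 ^ seq.length - i = (2 ^ seq.length - (i+1)) + 1 := by omega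
    rw [aOuter, if_pos h, aOuter_spec, hlen, List.range'_succ]
    by_cases hb : (((aInner seq i 0 []).length : Int) = k) <;> simp [hb]
  · rw [aOuter, if_neg h]
    have : 2 ^ seq.length - i = 0 := by omega
    simp [this]
termination_by 2 ^ seq.length - i

theorem colexB_pos (n : Nat) (k : Int) (h : 0 < k) :
    colexB n k = (List.range n).flatMap (fun m => (colexB m (k - 1)).map (fun c => c ++ [m])) := by
  rw [colexB, if_neg (by omega), if_neg (by omega)]
  simp [List.flatMap_subtype]

theorem bitsOf_low (n : Nat) (t : Nat) (ht : t < 2 ^ n) : bitsOf (n + 1) t = bitsOf n t := by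
  unfold bitsOf
  rw [List.range_succ, List.filter_append]
  simp [Nat.testBit_lt_two_pow ht]

theorem bitsOf_high (n : Nat) (t : Nat) (ht : t < 2 ^ n) :
    bitsOf (n + 1) (2 ^ n + t) = bitsOf n t ++ [n] := by
  unfold bitsOf
  rw [List.range_succ, List.filter_append]
  have h1 : (List.range n).filter (2 ^ n + t).testBit = (List.range n).filter t.testBit := by
    apply List.filter_congr
    intro j hj
    rw [Nat.testBit_two_pow_add_gt (List.mem_range.mp hj)]
  have h2 : (2 ^ n + t).testBit n = true := by
    rw [Nat.testBit_two_pow_add_eq, Nat.testBit_lt_two_pow ht]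
    rfl
  rw [h1]
  simp [h2]

theorem fm_shift (l : List Nat) (k : Int) (f : Nat → List Nat) (x : Nat) :
    l.filterMap (fun t => if ((f t).length + 1 : Int) = k then some (f t ++ [x]) else none)
      = (l.filterMap (fun t => if ((f t).length : Int) = k - 1 then some (f t) else none)).map
          (fun c => c ++ [x]) := by
  induction l with
  | nil => simp
  | cons a l ih =>
    simp only [List.filterMap_cons]
    by_cases h : (((f a).length : Int) + 1 = k)
    · rw [if_pos h, if_pos (by omega)]
      simp [ih]
    · rw [if_neg h, if_neg (by omega), ih]

theorem main_lemma (n : Nat) (k : Int) :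
    (List.range (2 ^ n)).filterMap (fun t =>
        if ((bitsOf n t).length : Int) = k then some (bitsOf n t) else none) = colexB n k := by
  induction n generalizing k with
  | zero =>
    have : bitsOf 0 0 = [] := rfl
    by_cases h : k = 0
    · subst h; simp [this, colexB]
    · rcases lt_or_gt_of_ne h with hk | hk
      · rw [colexB, if_neg h, if_pos hk]; simp; omega
      · rw [colexB_pos 0 k hk]; simp; omega
  | succ n ih =>
    have h2 : 2 ^ (n + 1) = 2 ^ n + 2 ^ n := by ring
    rw [h2, List.range_add, List.filterMap_append, List.filterMap_map]
    have hfirst : (List.range (2 ^ n)).filterMap (fun t =>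
        if ((bitsOf (n+1) t).length : Int) = k then some (bitsOf (n+1) t) else none)
        = colexB n k := by
      rw [← ih k]
      apply List.filterMap_congr
      intro t htm
      rw [bitsOf_low n t (List.mem_range.mp htm)]
    have hsecond : (List.range (2 ^ n)).filterMap ((fun t =>
        if ((bitsOf (n+1) t).length : Int) = k then some (bitsOf (n+1) t) else none) ∘ (fun t => 2 ^ n + t))
        = (colexB n (k - 1)).map (fun c => c ++ [n]) := by
      rw [← ih (k - 1), ← fm_shift (List.range (2 ^ n)) k (bitsOf n) n]
      apply List.filterMap_congr
      intro t htm
      simp only [Function.comp]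
      rw [bitsOf_high n t (List.mem_range.mp htm)]
      simp
    rw [hfirst, hsecond]
    by_cases h : k = 0
    · subst h
      have hm1 : colexB n (0 - 1 : Int) = [] := by rw [colexB]; norm_num
      rw [hm1]
      simp [colexB]
    · rcases lt_or_gt_of_ne h with hk | hk
      · have ha : colexB n k = [] := by rw [colexB, if_neg h, if_pos hk]
        have hb : colexB n (k - 1) = [] := by rw [colexB, if_neg (by omega), if_pos (by omega)]
        have hc : colexB (n + 1) k = [] := by rw [colexB, if_neg h, if_pos hk]
        simp [ha, hb, hc]
      · rw [colexB_pos (n + 1) k hk, List.range_succ, List.flatMap_append, colexB_pos n k hk]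
        simp

theorem fm_mapout (l : List Nat) (k : Int) (f : Nat → List Nat) (g : Nat → Int) :
    l.filterMap (fun t => if (((f t).map g).length : Int) = k then some ((f t).map g) else none)
      = (l.filterMap (fun t => if ((f t).length : Int) = k then some (f t) else none)).map
          (List.map g) := by
  induction l with
  | nil => simp
  | cons a l ih =>
    simp only [List.length_map] at ih ⊢
    by_cases h : (((f a).length : Int) = k) <;> simp [h, ih]

-- ===== VERDICT (by name: the statement is the Claim_ definition above) =====
theorem combinlist_spec : Claim_equal_combinlist := by
  intro seq k _
  unfold Spec_combinlist combinlist combinlist_alt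
  rw [aOuter_spec]
  have hinner : ∀ t, aInner seq t 0 [] = (bitsOf seq.length t).map (fun j => seq.getD j 0) := by
    intro t
    rw [aInner_spec]
    simp [bitsOf, List.range_eq_range']
  have hr : List.range' 0 (2 ^ seq.length - 0) = List.range (2 ^ seq.length) := by
    simp [List.range_eq_range']
  simp only [hr, hinner, List.nil_append]
  rw [fm_mapout (List.range (2 ^ seq.length)) k (bitsOf seq.length) (fun j => seq.getD j 0),
    main_lemma]
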